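-- pv_equiv track=rewrite | github.com/RGPRafael/practice | HACKER RANK AND OTHERS/LuckB.py | Luck
-- ===== SOURCE A (Python) =====
-- def Luck(k,contests):
--     important      = list()
--     not_important  = list()
--     result = 0
--     for i in range(len(contests)):
--         if contests[i][1] == 1: important.append(contests[i][0])
--         else:                   not_important.append(contests[i][0])
--     important.sort()
--     not_important.sort()
--     if len(important) > k:
--         win = len(important) - k
--         for i in range(len(important)):
--             if i < win : result = result - important[i]
--             else       : result = result + important[i]
--         for i in range(len(not_important)):
--             result = result + not_important[i]
--     else:
--         for i in range(len(important)):     result = result + important[i]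
--         for i in range(len(not_important)): result = result + not_important[i]
--
--     return result
-- ===== SOURCE B (Python) =====
-- def _sum_smallest(xs, m):
--     # Quickselect-style: sum of the m smallest elements of xs, without sorting.
--     if m <= 0:
--         return 0
--     if m >= len(xs):
--         return sum(xs)
--     pivot = xs[0]
--     less = [x for x in xs[1:] if x < pivot]
--     geq = [x for x in xs[1:] if x >= pivot]
--     if m <= len(less):
--         return _sum_smallest(less, m)
--     return sum(less) + pivot + _sum_smallest(geq, m - len(less) - 1)
--
--
-- def Luck(k, contests):
--     # One pass: grand total + the important values; the answer is the closed
--     # form total - 2 * (sum of the (count-k) smallest important values),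
--     # found by quickselect partitioning instead of sorting.
--     total = 0
--     important = []
--     for c in contests:
--         total += c[0]
--         if c[1] == 1:
--             important.append(c[0])
--     return total - 2 * _sum_smallest(important, len(important) - k)
-- ===== Notes on version B (the rewrite author's own statement) =====
-- stated objective: alternative
-- what changed: Replaces A's two sorts and three index loops by a single pass computing the grand total plus the important values and a quickselect-style partition recursion that sums the (count-k) smallest important values without sorting.
import Mathlib
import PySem

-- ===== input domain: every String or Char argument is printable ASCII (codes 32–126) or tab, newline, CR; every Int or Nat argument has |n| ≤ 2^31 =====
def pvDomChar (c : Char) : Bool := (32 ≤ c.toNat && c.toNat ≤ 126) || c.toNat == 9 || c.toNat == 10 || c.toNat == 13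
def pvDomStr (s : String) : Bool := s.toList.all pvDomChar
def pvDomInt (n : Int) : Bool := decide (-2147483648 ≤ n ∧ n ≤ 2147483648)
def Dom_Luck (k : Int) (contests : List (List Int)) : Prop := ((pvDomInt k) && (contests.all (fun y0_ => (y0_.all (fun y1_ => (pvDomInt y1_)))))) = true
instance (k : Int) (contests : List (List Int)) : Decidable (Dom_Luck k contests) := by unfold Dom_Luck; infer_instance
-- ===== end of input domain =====

-- B: one pass computing the grand total + the important values, then the closed form
-- total - 2*(sum of the (count-k) smallest important values), found by a quickselect-style
-- partition recursion instead of A's two sorts and three index loops.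

-- ===== PORT A =====
def Luck (k : Int) (contests : List (List Int)) : Int :=
  let st := (PySem.List.pyRange 0 (contests.length : Int) 1).foldl
    (fun (st : List Int × List Int) i =>
      if PySem.List.pyGetD (PySem.List.pyGetD contests i []) 1 0 = 1
      then (st.1 ++ [PySem.List.pyGetD (PySem.List.pyGetD contests i []) 0 0], st.2)
      else (st.1, st.2 ++ [PySem.List.pyGetD (PySem.List.pyGetD contests i []) 0 0])) ([], [])
  let important := PySem.List.sorted st.1 (fun x => x) false
  let not_important := PySem.List.sorted st.2 (fun x => x) false
  if (important.length : Int) > k then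
    let win := (important.length : Int) - k
    let r1 := (PySem.List.pyRange 0 (important.length : Int) 1).foldl
      (fun r i => if i < win then r - PySem.List.pyGetD important i 0
                  else r + PySem.List.pyGetD important i 0) 0
    (PySem.List.pyRange 0 (not_important.length : Int) 1).foldl
      (fun r i => r + PySem.List.pyGetD not_important i 0) r1
  else
    let r1 := (PySem.List.pyRange 0 (important.length : Int) 1).foldl
      (fun r i => r + PySem.List.pyGetD important i 0) 0
    (PySem.List.pyRange 0 (not_important.length : Int) 1).foldl
      (fun r i => r + PySem.List.pyGetD not_important i 0) r1

-- ===== PORT B =====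
-- quickselect-style sum of the m smallest elements of xs (port of _sum_smallest)
def sumSmallest (xs : List Int) (m : Int) : Int :=
  if m ≤ 0 then 0
  else if h2 : (xs.length : Int) ≤ m then xs.sum
  else
    let pivot := PySem.List.pyGetD xs 0 0
    let less := (PySem.List.slice xs (some 1) none).filter (fun x => x < pivot)
    let geq := (PySem.List.slice xs (some 1) none).filter (fun x => x ≥ pivot)
    if m ≤ (less.length : Int) then sumSmallest less m
    else less.sum + pivot + sumSmallest geq (m - (less.length : Int) - 1)
termination_by xs.length
decreasing_by
  · have hx : xs ≠ [] := by intro h; subst h; simp at h2; omega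
    calc (List.filter _ (PySem.List.slice xs (some 1) none)).length
        ≤ (PySem.List.slice xs (some 1) none).length := List.length_filter_le _ _
      _ < xs.length := by rw [PySem.List.slice_from_one]; cases xs <;> simp_all
  · have hx : xs ≠ [] := by intro h; subst h; simp at h2; omega
    calc (List.filter _ (PySem.List.slice xs (some 1) none)).length
        ≤ (PySem.List.slice xs (some 1) none).length := List.length_filter_le _ _
      _ < xs.length := by rw [PySem.List.slice_from_one]; cases xs <;> simp_all

def Luck_alt (k : Int) (contests : List (List Int)) : Int :=
  let st := contests.foldl
    (fun (st : Int × List Int) c =>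
      (st.1 + PySem.List.pyGetD c 0 0,
       if PySem.List.pyGetD c 1 0 = 1 then st.2 ++ [PySem.List.pyGetD c 0 0] else st.2)) (0, [])
  st.1 - 2 * sumSmallest st.2 ((st.2.length : Int) - k)

-- ===== PRECONDITION & SPEC =====
-- Pre_ excludes exactly the inputs on which the Python A raises IndexError: a contest row with fewer than 2 entries.
def Pre_Luck (k : Int) (contests : List (List Int)) : Prop :=
  ∀ c ∈ contests, 2 ≤ c.length
instance (k : Int) (contests : List (List Int)) : Decidable (Pre_Luck k contests) := by
  unfold Pre_Luck; infer_instance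
def pvWitness_Luck : Int × List (List Int) := (1, [[5, 1], [3, 0], [2, 1]])
def Spec_Luck (k : Int) (contests : List (List Int)) (out : Int) : Prop := out = Luck_alt k contests
instance (k : Int) (contests : List (List Int)) (out : Int) : Decidable (Spec_Luck k contests out) := by unfold Spec_Luck; infer_instance

-- ===== CLAIM (what is proved, stated in full; the proofs are below) =====
def Claim_equal_Luck : Prop := ∀ (k : Int) (contests : List (List Int)), Dom_Luck k contests → Pre_Luck k contests → Spec_Luck k contests (Luck k contests)

-- ===== LEMMAS AND PROOFS =====

-- A's splitting loop over indices is the same fold over the rows themselves.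
theorem luck_rows (contests : List (List Int)) :
    (PySem.List.pyRange 0 (contests.length : Int) 1).foldl
      (fun (st : List Int × List Int) i =>
        if PySem.List.pyGetD (PySem.List.pyGetD contests i []) 1 0 = 1
        then (st.1 ++ [PySem.List.pyGetD (PySem.List.pyGetD contests i []) 0 0], st.2)
        else (st.1, st.2 ++ [PySem.List.pyGetD (PySem.List.pyGetD contests i []) 0 0])) ([], [])
    = contests.foldl
        (fun (st : List Int × List Int) c =>
          if PySem.List.pyGetD c 1 0 = 1
          then (st.1 ++ [PySem.List.pyGetD c 0 0], st.2)
          else (st.1, st.2 ++ [PySem.List.pyGetD c 0 0])) ([], []) :=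
  PySem.List.foldl_pyRange_zero_pyGetD' contests []
    (fun (st : List Int × List Int) c =>
      if PySem.List.pyGetD c 1 0 = 1
      then (st.1 ++ [PySem.List.pyGetD c 0 0], st.2)
      else (st.1, st.2 ++ [PySem.List.pyGetD c 0 0])) ([], [])

-- A's splitting loop, with both accumulators generalized.
theorem luck_split (contests : List (List Int)) (a b : List Int) :
    contests.foldl
      (fun (st : List Int × List Int) c =>
        if PySem.List.pyGetD c 1 0 = 1
        then (st.1 ++ [PySem.List.pyGetD c 0 0], st.2)
        else (st.1, st.2 ++ [PySem.List.pyGetD c 0 0])) (a, b)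
    = (a ++ (contests.filter (fun c => PySem.List.pyGetD c 1 0 == 1)).map
          (fun c => PySem.List.pyGetD c 0 0),
       b ++ (contests.filter (fun c => ¬ (PySem.List.pyGetD c 1 0 == 1))).map
          (fun c => PySem.List.pyGetD c 0 0)) := by
  induction contests generalizing a b with
  | nil => simp
  | cons c cs ih =>
    simp only [List.foldl_cons, List.filter_cons]
    by_cases h : PySem.List.pyGetD c 1 0 = 1 <;>
      simp [h, ih, List.append_assoc]

-- B's single pass, accumulators generalized.
theorem luck_alt_pass (contests : List (List Int)) (t : Int) (b : List Int) :
    contests.foldl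
      (fun (st : Int × List Int) c =>
        (st.1 + PySem.List.pyGetD c 0 0,
         if PySem.List.pyGetD c 1 0 = 1 then st.2 ++ [PySem.List.pyGetD c 0 0] else st.2))
      (t, b)
    = (t + (contests.map (fun c => PySem.List.pyGetD c 0 0)).sum,
       b ++ (contests.filter (fun c => PySem.List.pyGetD c 1 0 == 1)).map
          (fun c => PySem.List.pyGetD c 0 0)) := by
  induction contests generalizing t b with
  | cons c cs ih =>
    simp only [List.foldl_cons, List.filter_cons, List.map_cons, List.sum_cons]
    by_cases h : PySem.List.pyGetD c 1 0 = 1 <;>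
      simp [h, ih, List.append_assoc, add_assoc]
  | nil => simp

-- The sum of a map splits along a filter and its complement.
theorem sum_map_filter_split (l : List (List Int)) (p : List Int → Bool) (f : List Int → Int) :
    ((l.filter p).map f).sum + ((l.filter (fun c => ¬ p c)).map f).sum
      = (l.map f).sum := by
  induction l with
  | nil => simp
  | cons c cs ih =>
    by_cases h : p c <;> simp [h, ← ih] <;> ring

-- Indexing xs over range(0, w) reads off the prefix of length w.
theorem map_range_pyGetD (xs : List Int) (w : Int) (_h0 : 0 ≤ w) (hw : w ≤ (xs.length : Int)) :
    (PySem.List.pyRange 0 w 1).map (fun i => PySem.List.pyGetD xs i 0) = xs.take w.toNat := by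
  apply List.ext_getElem
  · simp [PySem.List.length_pyRange_one, List.length_take]; omega
  · intro n h1 h2
    have hn : (n : Int) < w := by
      have := h1; simp [PySem.List.length_pyRange_one] at this; omega
    have hlen : n < xs.length := by
      have := h2; simp [List.length_take] at this; omega
    simp only [List.getElem_map, PySem.List.getElem_pyRange_one, zero_add, List.getElem_take]
    rw [PySem.List.pyGetD_eq_getElem xs 0 (by omega) (by omega)]
    simp

-- An addition loop over all indices of xs adds xs.sum.
theorem foldl_range_add (xs : List Int) (r : Int) :
    (PySem.List.pyRange 0 (xs.length : Int) 1).foldl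
      (fun r i => r + PySem.List.pyGetD xs i 0) r = r + xs.sum := by
  rw [PySem.List.foldl_add (g := fun i => PySem.List.pyGetD xs i 0),
      PySem.List.map_pyGetD_pyRange_zero']

-- A's signed loop over xs: subtract entries with index below w, add the rest (w within bounds).
theorem foldl_signed_le (xs : List Int) (w : Int) (hw0 : 0 ≤ w) (hw : w ≤ (xs.length : Int)) :
    (PySem.List.pyRange 0 (xs.length : Int) 1).foldl
      (fun r i => if i < w then r - PySem.List.pyGetD xs i 0
                  else r + PySem.List.pyGetD xs i 0) 0
    = (xs.drop w.toNat).sum - (xs.take w.toNat).sum := by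
  have hcongr : (PySem.List.pyRange 0 (xs.length : Int) 1).foldl
      (fun r i => if i < w then r - PySem.List.pyGetD xs i 0
                  else r + PySem.List.pyGetD xs i 0) 0
      = (PySem.List.pyRange 0 (xs.length : Int) 1).foldl
      (fun r i => r + (if i < w then -PySem.List.pyGetD xs i 0 else PySem.List.pyGetD xs i 0)) 0 := by
    apply PySem.List.foldl_congr_mem
    intro acc i _
    split_ifs <;> ring
  rw [hcongr,
      PySem.List.foldl_add (g := fun i => if i < w then -PySem.List.pyGetD xs i 0 else PySem.List.pyGetD xs i 0),
      PySem.List.pyRange_one_append 0 w (xs.length : Int) hw0 hw,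
      List.map_append, List.sum_append]
  have hfst : ((PySem.List.pyRange 0 w 1).map
      (fun i => if i < w then -PySem.List.pyGetD xs i 0 else PySem.List.pyGetD xs i 0)).sum
      = -(xs.take w.toNat).sum := by
    have hmc : (PySem.List.pyRange 0 w 1).map
        (fun i => if i < w then -PySem.List.pyGetD xs i 0 else PySem.List.pyGetD xs i 0)
        = (PySem.List.pyRange 0 w 1).map (fun i => -PySem.List.pyGetD xs i 0) := by
      apply List.map_congr_left
      intro i hi
      rw [PySem.List.mem_pyRange_one] at hi
      rw [if_pos hi.2]
    rw [hmc,
      show (fun i => -PySem.List.pyGetD xs i 0)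
        = (fun v : Int => -v) ∘ (fun i => PySem.List.pyGetD xs i 0) from rfl,
      ← List.map_map, map_range_pyGetD xs w hw0 hw]
    exact (List.sum_neg _).symm
  have hsnd : ((PySem.List.pyRange w (xs.length : Int) 1).map
      (fun i => if i < w then -PySem.List.pyGetD xs i 0 else PySem.List.pyGetD xs i 0)).sum
      = (xs.drop w.toNat).sum := by
    have hmc : (PySem.List.pyRange w (xs.length : Int) 1).map
        (fun i => if i < w then -PySem.List.pyGetD xs i 0 else PySem.List.pyGetD xs i 0)
        = (PySem.List.pyRange w (xs.length : Int) 1).map (fun i => PySem.List.pyGetD xs i 0) := by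
      apply List.map_congr_left
      intro i hi
      rw [PySem.List.mem_pyRange_one] at hi
      rw [if_neg (by omega)]
    rw [hmc, PySem.List.map_pyGetD_pyRange' xs 0 hw0]
  rw [hfst, hsnd]
  ring

-- The same without the upper bound on w: past the end everything is subtracted.
theorem foldl_signed (xs : List Int) (w : Int) (hw0 : 0 ≤ w) :
    (PySem.List.pyRange 0 (xs.length : Int) 1).foldl
      (fun r i => if i < w then r - PySem.List.pyGetD xs i 0
                  else r + PySem.List.pyGetD xs i 0) 0
    = (xs.drop w.toNat).sum - (xs.take w.toNat).sum := by
  by_cases hw : w ≤ (xs.length : Int)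
  · exact foldl_signed_le xs w hw0 hw
  · have hcongr : (PySem.List.pyRange 0 (xs.length : Int) 1).foldl
        (fun r i => if i < w then r - PySem.List.pyGetD xs i 0
                    else r + PySem.List.pyGetD xs i 0) 0
        = (PySem.List.pyRange 0 (xs.length : Int) 1).foldl
        (fun r i => r + (if i < w then -PySem.List.pyGetD xs i 0 else PySem.List.pyGetD xs i 0)) 0 := by
      apply PySem.List.foldl_congr_mem
      intro acc i _
      split_ifs <;> ring
    have hmc : (PySem.List.pyRange 0 (xs.length : Int) 1).map
        (fun i => if i < w then -PySem.List.pyGetD xs i 0 else PySem.List.pyGetD xs i 0)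
        = (PySem.List.pyRange 0 (xs.length : Int) 1).map (fun i => -PySem.List.pyGetD xs i 0) := by
      apply List.map_congr_left
      intro i hi
      rw [PySem.List.mem_pyRange_one] at hi
      rw [if_pos (by omega)]
    rw [hcongr,
        PySem.List.foldl_add (g := fun i => if i < w then -PySem.List.pyGetD xs i 0 else PySem.List.pyGetD xs i 0),
        hmc,
        show (fun i => -PySem.List.pyGetD xs i 0)
          = (fun v : Int => -v) ∘ (fun i => PySem.List.pyGetD xs i 0) from rfl,
        ← List.map_map, PySem.List.map_pyGetD_pyRange_zero',
        List.take_of_length_le (by omega), List.drop_eq_nil_of_le (by omega)]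
    simp [List.sum_neg]

-- The quickselect partition, sorted, reassembles the sorted list.
theorem sorted_partition (p : Int) (rest : List Int) :
    PySem.List.sorted (p :: rest) (fun x => x) false
      = PySem.List.sorted (rest.filter (fun x => x < p)) (fun x => x) false
        ++ p :: PySem.List.sorted (rest.filter (fun x => x ≥ p)) (fun x => x) false := by
  apply PySem.List.sorted_id_eq_of_perm_of_pairwise
  · have h1 : PySem.List.sorted (rest.filter (fun x => x < p)) (fun x => x) false
        ++ p :: PySem.List.sorted (rest.filter (fun x => x ≥ p)) (fun x => x) false
        |>.Perm (rest.filter (fun x => x < p) ++ p :: rest.filter (fun x => x ≥ p)) := by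
      exact List.Perm.append (PySem.List.sorted_perm _ _ _)
        (List.Perm.cons p (PySem.List.sorted_perm _ _ _))
    refine h1.trans ?_
    refine List.perm_middle.trans (List.Perm.cons p ?_)
    have : rest.filter (fun x => x ≥ p) = rest.filter (fun x => !(decide (x < p))) := by
      apply List.filter_congr; intro x _
      by_cases h : x < p
      · simp [h, not_le.mpr h]
      · simp [h, not_lt.mp h]
    rw [this]
    exact List.filter_append_perm _ rest
  · rw [List.pairwise_append]
    refine ⟨PySem.List.sorted_pairwise _ _, ?_, ?_⟩
    · rw [List.pairwise_cons]
      refine ⟨?_, PySem.List.sorted_pairwise _ _⟩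
      intro b hb
      rw [PySem.List.mem_sorted] at hb
      have := List.of_mem_filter hb
      simp at this; omega
    · intro a ha b hb
      rw [PySem.List.mem_sorted] at ha
      have ha' := List.of_mem_filter ha
      simp at ha'
      rcases List.mem_cons.mp hb with rfl | hb
      · omega
      · rw [PySem.List.mem_sorted] at hb
        have := List.of_mem_filter hb
        simp at this; omega

-- The quickselect recursion computes the sum of the m smallest elements.
theorem sumSmallest_eq (xs : List Int) (m : Int) :
    sumSmallest xs m = ((PySem.List.sorted xs (fun x => x) false).take m.toNat).sum := by
  induction hn : xs.length using Nat.strong_induction_on generalizing xs m with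
  | _ n ih =>
  subst hn
  rw [sumSmallest]
  by_cases h1 : m ≤ 0
  · rw [if_pos h1]
    have : m.toNat = 0 := by omega
    simp [this]
  rw [if_neg h1]
  by_cases h2 : (xs.length : Int) ≤ m
  · rw [dif_pos h2]
    rw [List.take_of_length_le (by rw [PySem.List.length_sorted]; omega)]
    exact (List.Perm.sum_eq (PySem.List.sorted_perm xs _ _)).symm
  rw [dif_neg h2]
  have hx : xs ≠ [] := by
    have : 0 < xs.length := by omega
    exact List.ne_nil_of_length_pos this
  obtain ⟨p, rest, rfl⟩ := List.exists_cons_of_ne_nil hx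
  have hp : PySem.List.pyGetD (p :: rest) 0 0 = p := by
    simp [PySem.List.pyGetD, PySem.List.pyGet?, PySem.List.pyIdx?]
  simp only [hp, PySem.List.slice_from_one, List.tail_cons]
  set less := rest.filter (fun x => x < p) with hless
  set geq := rest.filter (fun x => x ≥ p) with hgeq
  have hlen_less : less.length < (p :: rest).length :=
    Nat.lt_succ_of_le (List.length_filter_le _ _)
  have hlen_geq : geq.length < (p :: rest).length :=
    Nat.lt_succ_of_le (List.length_filter_le _ _)
  rw [sorted_partition p rest, ← hless, ← hgeq]
  set L := less.length with hL
  have hsl : (PySem.List.sorted less (fun x => x) false).length = L :=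
    PySem.List.length_sorted _ _ _
  rw [List.take_append, hsl]
  by_cases h3 : m ≤ (L : Int)
  · rw [if_pos h3]
    have ht0 : m.toNat - L = 0 := by omega
    rw [ht0, List.take_zero, List.append_nil]
    exact ih less.length hlen_less less m rfl
  · rw [if_neg h3]
    have h4 : L ≤ m.toNat := by omega
    rw [List.take_of_length_le (by rw [hsl]; omega)]
    have h5 : m.toNat - L = (m.toNat - L - 1) + 1 := by omega
    rw [h5, List.take_succ_cons, List.sum_append, List.sum_cons]
    have hrec := ih geq.length hlen_geq geq (m - (L : Int) - 1) rfl
    have h6 : (m - (L : Int) - 1).toNat = m.toNat - L - 1 := by omega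
    rw [hrec, h6]
    have hsum : (PySem.List.sorted less (fun x => x) false).sum = less.sum :=
      List.Perm.sum_eq (PySem.List.sorted_perm _ _ _)
    rw [hsum]; ring

-- ===== VERDICT (by name: the statement is the Claim_ definition above) =====
theorem Luck_spec : Claim_equal_Luck := by
  intro k contests _ _
  unfold Spec_Luck Luck Luck_alt
  rw [luck_rows, luck_split, luck_alt_pass]
  simp only [List.nil_append, zero_add]
  set imp := (contests.filter (fun c => PySem.List.pyGetD c 1 0 == 1)).map
      (fun c => PySem.List.pyGetD c 0 0) with himp
  set nimp := (contests.filter (fun c => ¬ (PySem.List.pyGetD c 1 0 == 1))).map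
      (fun c => PySem.List.pyGetD c 0 0) with hnimp
  set ximp := PySem.List.sorted imp (fun x => x) false with hs
  set xnimp := PySem.List.sorted nimp (fun x => x) false with hsn
  have hlen : (ximp.length : Int) = (imp.length : Int) := by
    rw [hs, PySem.List.length_sorted]
  have hsum : ximp.sum = imp.sum := by
    exact List.Perm.sum_eq (PySem.List.sorted_perm imp (fun x => x) false)
  have hsumn : xnimp.sum = nimp.sum := by
    exact List.Perm.sum_eq (PySem.List.sorted_perm nimp (fun x => x) false)
  have htot : (contests.map (fun c => PySem.List.pyGetD c 0 0)).sum = imp.sum + nimp.sum := by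
    rw [himp, hnimp, sum_map_filter_split]
  rw [sumSmallest_eq, ← hs]
  by_cases hk : (ximp.length : Int) > k
  · rw [if_pos hk]
    rw [foldl_signed ximp ((ximp.length : Int) - k) (by omega),
        foldl_range_add]
    have hsplit := List.take_append_drop (((imp.length : Int)) - k).toNat ximp
    have hsp : (ximp.take (((imp.length : Int)) - k).toNat).sum
         + (ximp.drop (((imp.length : Int)) - k).toNat).sum = ximp.sum := by
      rw [← List.sum_append, hsplit]
    have hw : (((ximp.length : Int)) - k).toNat = (((imp.length : Int)) - k).toNat := by omega
    rw [hw]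
    omega
  · rw [if_neg hk]
    rw [foldl_range_add, foldl_range_add]
    have ht0 : ((imp.length : Int) - k).toNat = 0 := by omega
    rw [ht0]
    simp
    omega
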